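-- pv_equiv track=rewrite | github.com/piotoor/AdventOfCode2022 | day15.py | tuning_frequency
-- ===== SOURCE A (Python) =====
-- def manhattan(a, b):
--     return abs(a[0] - b[0]) + abs(a[1] - b[1])
--
-- def merge_ranges(ranges):
--     ranges.sort(key=lambda x: x[0])
--
--     idx = 0
--
--     for i in range(1, len(ranges)):
--         if ranges[idx][1] >= ranges[i][0] - 1:
--             ranges[idx][1] = max(ranges[idx][1], ranges[i][1])
--         else:
--             idx = idx + 1
--             ranges[idx] = ranges[i]
--
--     return ranges[:idx + 1]
--
-- def tuning_frequency(data, bounds):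
--     manhattans = {}
--
--     for s, b in data:
--         manhattans[s] = manhattan(s, b)
--
--     for y in range(bounds, -1, -1):
--         ranges = []
--         for s in manhattans:
--             sx, sy = s
--
--             if sy > y >= sy - manhattans[s] or sy <= y <= sy + manhattans[s]:
--                 dy = abs(sy - y)
--                 ranges.append([sx - abs(manhattans[s] - dy), sx + abs(manhattans[s] - dy)])
--
--         merged_range = merge_ranges(ranges)
--         if len(merged_range) == 2:
--             x = merged_range[0][1] + 1
--             return x * 4000000 + y
-- ===== SOURCE B (Python) =====
-- def tuning_frequency(data, bounds):
--     radii = {}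
--     for s, b in data:
--         radii[s] = abs(s[0] - b[0]) + abs(s[1] - b[1])
--     sensors = list(radii.items())
--     for y in range(bounds, -1, -1):
--         ivs = [(sx - r, sx + r)
--                for (sx, sy), m in sensors
--                for r in [m - abs(sy - y)]
--                if r >= 0]
--         covered = lambda x: any(lo <= x <= hi for lo, hi in ivs)
--         # lo starts a connected component of the covered cells iff lo-1 is uncovered
--         starts = {lo for lo, hi in ivs if not covered(lo - 1)}
--         if len(starts) == 2:
--             s2 = max(starts)
--             first_end = max(hi for lo, hi in ivs if hi < s2)
--             return (first_end + 1) * 4000000 + y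
--     return None
-- ===== Notes on version B (the rewrite author's own statement) =====
-- stated objective: alternative
-- what changed: A sorts each row's coverage intervals and merges them in place with index surgery, returning when the merged list has two entries; B never sorts or merges: per row it counts connected components of the covered cells directly by point-coverage tests (an interval's lo starts a component iff lo-1 is uncovered), and when exactly two distinct starts exist returns max{hi : hi < second start} + 1.
import Mathlib
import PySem

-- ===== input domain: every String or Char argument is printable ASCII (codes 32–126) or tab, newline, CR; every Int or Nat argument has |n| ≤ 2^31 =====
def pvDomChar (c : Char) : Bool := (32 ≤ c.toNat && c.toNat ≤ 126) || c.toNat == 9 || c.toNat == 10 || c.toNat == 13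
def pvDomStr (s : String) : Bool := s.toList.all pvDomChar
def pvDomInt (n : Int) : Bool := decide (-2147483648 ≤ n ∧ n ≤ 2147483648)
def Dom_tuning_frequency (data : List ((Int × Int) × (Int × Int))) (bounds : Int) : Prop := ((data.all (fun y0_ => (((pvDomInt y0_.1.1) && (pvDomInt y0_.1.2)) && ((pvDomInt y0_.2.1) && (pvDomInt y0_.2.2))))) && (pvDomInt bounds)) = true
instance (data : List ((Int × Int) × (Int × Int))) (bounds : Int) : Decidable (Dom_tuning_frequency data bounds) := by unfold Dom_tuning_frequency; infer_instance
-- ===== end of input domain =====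

-- B replaces A's per-row sort + in-place merge of coverage intervals by a sort-free component
-- count via point-coverage tests (a lo starts a component iff lo-1 is uncovered); objective:
-- alternative structure, same per-input results. A mutates only a list local to it, so there is
-- no observable side effect.

-- ===== PORT A =====
def pvManhattan (a b : Int × Int) : Int := |a.1 - b.1| + |a.2 - b.2|

-- one iteration of merge_ranges' for-loop; indices idx and i are provably in range, so pyGetD/pySetD are exact
def pvMergeStep (st : List (Int × Int) × Int) (i : Int) : List (Int × Int) × Int :=
  let rs := st.1
  let idx := st.2
  let ri := PySem.List.pyGetD rs i ((0 : Int), (0 : Int))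
  let rx := PySem.List.pyGetD rs idx ((0 : Int), (0 : Int))
  if rx.2 ≥ ri.1 - 1 then (PySem.List.pySetD rs idx (rx.1, max rx.2 ri.2), idx)
  else (PySem.List.pySetD rs (idx + 1) ri, idx + 1)

def pvMergeRanges (ranges : List (Int × Int)) : List (Int × Int) :=
  let rs := PySem.List.sorted ranges (fun r => r.1) false
  let st := (PySem.List.pyRange 1 (PySem.List.len rs) 1).foldl pvMergeStep (rs, 0)
  PySem.List.slice st.1 none (some (st.2 + 1))

-- one row of A's outer loop (the body of `for y in range(bounds, -1, -1)`)
def pvRowA (d : PySem.Dict (Int × Int) Int) (y : Int) : Option Int :=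
  let ranges := d.keys.foldl (fun acc s =>
    let m := (d.get? s).getD 0  -- manhattans[s]; s is a key of the dict, so exact
    if (s.2 > y ∧ y ≥ s.2 - m) ∨ (s.2 ≤ y ∧ y ≤ s.2 + m) then
      let dy := |s.2 - y|
      acc ++ [(s.1 - |m - dy|, s.1 + |m - dy|)]
    else acc) []
  let merged := pvMergeRanges ranges
  if PySem.List.len merged == 2 then
    some (((PySem.List.pyGetD merged 0 ((0 : Int), (0 : Int))).2 + 1) * 4000000 + y)
  else none

-- the outer loop: A returns from inside the loop, i.e. at the first row whose body returns
def pvRowsA (d : PySem.Dict (Int × Int) Int) : List Int → Option Int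
  | [] => none
  | y :: ys => match pvRowA d y with
    | some v => some v
    | none => pvRowsA d ys

def tuning_frequency (data : List ((Int × Int) × (Int × Int))) (bounds : Int) : Option Int :=
  let manhattans : PySem.Dict (Int × Int) Int :=
    data.foldl (fun d p => d.insert p.1 (pvManhattan p.1 p.2)) PySem.Dict.empty
  pvRowsA manhattans (PySem.List.pyRange bounds (-1) (-1))

-- ===== PORT B =====
-- B's `covered` lambda: is cell x covered by any interval of the row?
def pvCov (ivs : List (Int × Int)) (x : Int) : Bool :=
  ivs.any (fun iv => decide (iv.1 ≤ x ∧ x ≤ iv.2))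

-- one row of B's outer loop: count component starts (lo with lo-1 uncovered) by coverage tests
def pvRowB (sensors : List ((Int × Int) × Int)) (y : Int) : Option Int :=
  let ivs : List (Int × Int) := sensors.filterMap (fun p =>
    let r := p.2 - |p.1.2 - y|
    if r ≥ 0 then some (p.1.1 - r, p.1.1 + r) else none)
  let starts : List Int :=
    PySem.Set.ofList ((ivs.filter (fun iv => !pvCov ivs (iv.1 - 1))).map (fun iv => iv.1))
  if PySem.Set.len starts == 2 then
    match PySem.List.max? starts (fun x => x) with
    | none => none   -- unreachable: starts has two elements
    | some s2 =>
      match PySem.List.max? ((ivs.filter (fun iv => iv.2 < s2)).map (fun iv => iv.2)) (fun x => x) with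
      | none => none   -- unreachable: the first component ends below s2 (proved below)
      | some fe => some ((fe + 1) * 4000000 + y)
  else none

def pvRowsB (sensors : List ((Int × Int) × Int)) : List Int → Option Int
  | [] => none
  | y :: ys => match pvRowB sensors y with
    | some v => some v
    | none => pvRowsB sensors ys

def tuning_frequency_alt (data : List ((Int × Int) × (Int × Int))) (bounds : Int) : Option Int :=
  let radii : PySem.Dict (Int × Int) Int :=
    data.foldl (fun d p => d.insert p.1 (|p.1.1 - p.2.1| + |p.1.2 - p.2.2|)) PySem.Dict.empty
  pvRowsB radii.items (PySem.List.pyRange bounds (-1) (-1))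

-- ===== PRECONDITION & SPEC =====
def Spec_tuning_frequency (data : List ((Int × Int) × (Int × Int))) (bounds : Int) (out : Option Int) : Prop := out = tuning_frequency_alt data bounds
instance (data : List ((Int × Int) × (Int × Int))) (bounds : Int) (out : Option Int) : Decidable (Spec_tuning_frequency data bounds out) := by unfold Spec_tuning_frequency; infer_instance

-- ===== CLAIM (what is proved, stated in full; the proofs are below) =====
def Claim_equal_tuning_frequency : Prop := ∀ (data : List ((Int × Int) × (Int × Int))) (bounds : Int), Dom_tuning_frequency data bounds → Spec_tuning_frequency data bounds (tuning_frequency data bounds)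

-- ===== LEMMAS AND PROOFS =====

-- reference merge: the merged intervals of a start-sorted interval list, as plain recursion
def pvMergeRec : Int × Int → List (Int × Int) → List (Int × Int)
  | cur, [] => [cur]
  | cur, (lo, hi) :: t =>
    if lo ≤ cur.2 + 1 then pvMergeRec (cur.1, max cur.2 hi) t
    else cur :: pvMergeRec (lo, hi) t

lemma pvSet_append_length {α : Type} (P : List α) (a v : α) (T : List α) :
    (P ++ a :: T).set P.length v = P ++ v :: T := by
  induction P with
  | nil => rfl
  | cons p P ih => simp [ih]

lemma pvSet_append_length_succ {α : Type} (P : List α) (a v : α) (T : List α) :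
    (P ++ a :: T).set (P.length + 1) v = P ++ a :: T.set 0 v := by
  induction P with
  | nil => rfl
  | cons p P ih => simp [ih]

lemma pvGetD_append_length (P : List (Int × Int)) (a : Int × Int) (T : List (Int × Int)) :
    PySem.List.pyGetD (P ++ a :: T) (P.length : Int) ((0:Int),(0:Int)) = a := by
  rw [PySem.List.pyGetD_natCast]
  simp [List.getD_eq_getElem?_getD]

-- A's in-place merge loop, characterised: starting from P ++ cur :: (J ++ rem) with idx = |P|
-- and loop counter i = |P| + 1 + |J|, the final slice is P ++ pvMergeRec cur rem.
lemma pvMergeLoop_spec (rem : List (Int × Int)) : ∀ (P J : List (Int × Int)) (cur : Int × Int),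
    (let st := (PySem.List.pyRange ((P.length : Int) + 1 + (J.length : Int))
        (((P.length : Int) + 1 + (J.length : Int)) + (rem.length : Int)) 1).foldl pvMergeStep
        (P ++ cur :: (J ++ rem), (P.length : Int));
     PySem.List.slice st.1 none (some (st.2 + 1))) = P ++ pvMergeRec cur rem := by
  induction rem with
  | nil =>
    intro P J cur
    simp only [List.length_nil, Nat.cast_zero, add_zero, List.append_nil]
    rw [PySem.List.pyRange_one_eq_nil le_rfl]
    simp only [List.foldl_nil]
    rw [PySem.List.slice_to _ (by positivity)]
    have h1 : ((P.length : Int) + 1).toNat = P.length + 1 := by omega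
    rw [h1, List.take_append]
    simp [pvMergeRec]
  | cons x rest ih =>
    intro P J cur
    obtain ⟨lo, hi⟩ := x
    have hcons : PySem.List.pyRange ((P.length : Int) + 1 + (J.length : Int))
        (((P.length : Int) + 1 + (J.length : Int)) + (((lo,hi) :: rest).length : Int)) 1
        = ((P.length : Int) + 1 + (J.length : Int)) :: PySem.List.pyRange ((P.length : Int) + 1 + (J.length : Int) + 1)
        (((P.length : Int) + 1 + (J.length : Int)) + (((lo,hi) :: rest).length : Int)) 1 := by
      apply PySem.List.pyRange_one_cons
      simp only [List.length_cons]
      push_cast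
      omega
    have hri : PySem.List.pyGetD (P ++ cur :: (J ++ (lo,hi) :: rest))
        ((P.length : Int) + 1 + (J.length : Int)) ((0:Int),(0:Int)) = (lo, hi) := by
      have hre : P ++ cur :: (J ++ (lo,hi) :: rest) = (P ++ cur :: J) ++ (lo,hi) :: rest := by simp
      have hlen : (P.length : Int) + 1 + (J.length : Int) = (((P ++ cur :: J).length : Nat) : Int) := by
        simp; ring
      rw [hre, hlen]
      exact pvGetD_append_length _ _ _
    have hrx : PySem.List.pyGetD (P ++ cur :: (J ++ (lo,hi) :: rest))
        ((P.length : Int)) ((0:Int),(0:Int)) = cur := pvGetD_append_length _ _ _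
    simp only [hcons, List.foldl_cons]
    simp only [pvMergeStep, hri, hrx]
    by_cases hc : lo ≤ cur.2 + 1
    · -- merge branch
      rw [if_pos (by omega : cur.2 ≥ lo - 1)]
      rw [show ((P.length : Int)) = ((P.length : Nat) : Int) from rfl, PySem.List.pySetD_natCast,
        pvSet_append_length]
      have := ih P (J ++ [(lo,hi)]) (cur.1, max cur.2 hi)
      simp only [List.append_assoc, List.cons_append, List.nil_append, List.length_append,
        List.length_cons, List.length_nil, Nat.cast_add, Nat.cast_one, Nat.cast_zero] at this ⊢
      rw [show pvMergeRec cur ((lo,hi) :: rest) = pvMergeRec (cur.1, max cur.2 hi) rest from by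
        simp [pvMergeRec, hc]]
      convert this using 4 <;> push_cast <;> ring
    · -- gap branch
      rw [if_neg (by omega : ¬ (cur.2 ≥ lo - 1))]
      rw [show ((P.length : Int) + 1) = (((P.length + 1 : Nat)) : Int) from by push_cast; ring,
        PySem.List.pySetD_natCast, pvSet_append_length_succ]
      rw [show pvMergeRec cur ((lo,hi) :: rest) = cur :: pvMergeRec (lo, hi) rest from by
        simp [pvMergeRec, hc]]
      cases J with
      | nil =>
        simp only [List.nil_append, List.set]
        have := ih (P ++ [cur]) [] (lo, hi)
        simp only [List.append_assoc, List.cons_append, List.nil_append, List.length_append,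
          List.length_cons, List.length_nil, Nat.cast_add, Nat.cast_one, Nat.cast_zero, add_zero] at this ⊢
        convert this using 4 <;> push_cast <;> ring
      | cons j J2 =>
        simp only [List.cons_append, List.set]
        have := ih (P ++ [cur]) (J2 ++ [(lo,hi)]) (lo, hi)
        simp only [List.append_assoc, List.cons_append, List.nil_append, List.length_append,
          List.length_cons, List.length_nil, Nat.cast_add, Nat.cast_one, Nat.cast_zero] at this ⊢
        convert this using 4 <;> push_cast <;> ring

lemma pvMergeRanges_eq (L : List (Int × Int)) (c : Int × Int) (t : List (Int × Int))
    (h : PySem.List.sorted L (fun r => r.1) false = c :: t) :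
    pvMergeRanges L = pvMergeRec c t := by
  unfold pvMergeRanges
  rw [h]
  have hlen : PySem.List.len (c :: t) = ((t.length + 1 : Nat) : Int) := by
    simp [PySem.List.len_eq]
  simp only [hlen]
  have := pvMergeLoop_spec t [] [] c
  simp only [List.nil_append, List.length_nil, Nat.cast_zero, zero_add, add_zero] at this
  convert this using 4 <;> push_cast <;> ring

lemma pvMergeRanges_nil : pvMergeRanges [] = [] := by
  unfold pvMergeRanges
  have h0 : PySem.List.sorted ([] : List (Int × Int)) (fun r => r.1) false = [] :=
    (PySem.List.sorted_eq_nil_iff _ _ _).mpr rfl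
  have h1 : PySem.List.len ([] : List (Int × Int)) = 0 := by simp [PySem.List.len_eq]
  simp only [h0, h1, PySem.List.pyRange_one_eq_nil (by norm_num : (0:Int) ≤ 1), List.foldl_nil]
  rw [PySem.List.slice_to _ (by norm_num)]
  simp

-- membership in a cons coverage list
lemma pvCov_cons (a : Int × Int) (l : List (Int × Int)) (x : Int) :
    pvCov (a :: l) x = (decide (a.1 ≤ x ∧ x ≤ a.2) || pvCov l x) := by
  simp [pvCov]

-- the structural invariant of the merged components (sorted tail t, current component (cl,e)):
-- separation, validity, coverage, containment, realised endpoints, and a lower bound on starts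
lemma pvGood (t : List (Int × Int)) : ∀ (cl e : Int),
    cl ≤ e →
    (∀ iv ∈ t, cl ≤ iv.1) →
    t.Pairwise (fun a b => a.1 ≤ b.1) →
    (∀ iv ∈ t, iv.1 ≤ iv.2) →
    (pvMergeRec (cl, e) t).Pairwise (fun a b => a.2 + 2 ≤ b.1) ∧
    (∀ c ∈ pvMergeRec (cl, e) t, c.1 ≤ c.2) ∧
    (∀ c ∈ pvMergeRec (cl, e) t, ∀ x, c.1 ≤ x → x ≤ c.2 → pvCov ((cl,e) :: t) x = true) ∧
    (∀ iv ∈ (cl,e) :: t, ∃ c ∈ pvMergeRec (cl, e) t, c.1 ≤ iv.1 ∧ iv.2 ≤ c.2) ∧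
    (∀ c ∈ pvMergeRec (cl, e) t, ∃ iv ∈ (cl,e) :: t, iv.1 = c.1) ∧
    (∀ c ∈ pvMergeRec (cl, e) t, ∃ iv ∈ (cl,e) :: t, iv.2 = c.2) ∧
    (∀ c ∈ pvMergeRec (cl, e) t, cl ≤ c.1) := by
  induction t with
  | nil =>
    intro cl e hce _ _ _
    refine ⟨by simp [pvMergeRec], ?_, ?_, ?_, ?_, ?_, ?_⟩ <;>
      simp [pvMergeRec, pvCov] <;> intros <;> omega
  | cons x t ih =>
    intro cl e hce hlb hpw hv
    obtain ⟨lo, hi⟩ := x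
    have hcl_lo : cl ≤ lo := hlb (lo,hi) (by simp)
    have hlo_hi : lo ≤ hi := hv (lo,hi) (by simp)
    have hlb' : ∀ iv ∈ t, lo ≤ iv.1 := fun iv hiv => (List.pairwise_cons.mp hpw).1 iv hiv
    have hpw' : t.Pairwise (fun a b => a.1 ≤ b.1) := (List.pairwise_cons.mp hpw).2
    have hv' : ∀ iv ∈ t, iv.1 ≤ iv.2 := fun iv hiv => hv iv (by simp [hiv])
    by_cases h : lo ≤ e + 1
    · -- merge: recurse with (cl, max e hi)
      have hrec : pvMergeRec (cl, e) ((lo,hi) :: t) = pvMergeRec (cl, max e hi) t := by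
        simp [pvMergeRec, h]
      obtain ⟨G1, G2, G3, G4, G5, G6, G7⟩ :=
        ih cl (max e hi) (le_trans hce (le_max_left _ _))
          (fun iv hiv => le_trans hcl_lo (hlb' iv hiv)) hpw' hv'
      rw [hrec]
      refine ⟨G1, G2, ?_, ?_, ?_, ?_, G7⟩
      · -- coverage transfer
        intro c hc x hx1 hx2
        have := G3 c hc x hx1 hx2
        rw [pvCov_cons] at this
        rcases Bool.or_eq_true_iff.mp this with hps | hrest
        · -- covered by pseudo (cl, max e hi)
          have hx : cl ≤ x ∧ x ≤ max e hi := by simpa using hps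
          by_cases hxe : x ≤ e
          · rw [pvCov_cons]; simp; left; omega
          · rw [pvCov_cons]; simp; right
            rw [pvCov_cons]; simp; left
            constructor <;> omega
        · rw [pvCov_cons]; simp; right; rw [pvCov_cons]; simp; right
          simpa using hrest
      · -- containment
        intro iv hiv
        rcases List.mem_cons.mp hiv with rfl | hiv'
        · obtain ⟨c, hc, hc1, hc2⟩ := G4 (cl, max e hi) (by simp)
          exact ⟨c, hc, hc1, by simp at hc2 ⊢; omega⟩
        rcases List.mem_cons.mp hiv' with rfl | hiv'' 
        · obtain ⟨c, hc, hc1, hc2⟩ := G4 (cl, max e hi) (by simp)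
          exact ⟨c, hc, by simp at hc1 ⊢; omega, by simp at hc2 ⊢; omega⟩
        · obtain ⟨c, hc, hc1, hc2⟩ := G4 iv (by simp [hiv''])
          exact ⟨c, hc, hc1, hc2⟩
      · -- starts realised
        intro c hc
        obtain ⟨iv, hiv, hiv1⟩ := G5 c hc
        rcases List.mem_cons.mp hiv with rfl | hiv'
        · exact ⟨(cl, e), by simp, by simpa using hiv1⟩
        · exact ⟨iv, by simp [hiv'], hiv1⟩
      · -- ends realised
        intro c hc
        obtain ⟨iv, hiv, hiv2⟩ := G6 c hc
        rcases List.mem_cons.mp hiv with rfl | hiv'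
        · by_cases hme : e ≤ hi
          · refine ⟨(lo, hi), by simp, ?_⟩
            simp at hiv2 ⊢; omega
          · refine ⟨(cl, e), by simp, ?_⟩
            simp at hiv2 ⊢; omega
        · exact ⟨iv, by simp [hiv'], hiv2⟩
    · -- split: new component (lo, hi)
      have hrec : pvMergeRec (cl, e) ((lo,hi) :: t) = (cl, e) :: pvMergeRec (lo, hi) t := by
        simp [pvMergeRec, h]
      obtain ⟨G1, G2, G3, G4, G5, G6, G7⟩ := ih lo hi hlo_hi hlb' hpw' hv'
      rw [hrec]
      refine ⟨?_, ?_, ?_, ?_, ?_, ?_, ?_⟩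
      · refine List.pairwise_cons.mpr ⟨?_, G1⟩
        intro c hc
        have := G7 c hc
        simp only []
        omega
      · intro c hc
        rcases List.mem_cons.mp hc with rfl | hc'
        · exact hce
        · exact G2 c hc'
      · intro c hc x hx1 hx2
        rcases List.mem_cons.mp hc with rfl | hc'
        · rw [pvCov_cons]; simp only [Bool.or_eq_true, decide_eq_true_eq]; left; exact ⟨hx1, hx2⟩
        · have := G3 c hc' x hx1 hx2
          rw [pvCov_cons]; simp; right
          simpa [pvCov] using this
      · intro iv hiv
        rcases List.mem_cons.mp hiv with rfl | hiv'
        · exact ⟨(cl, e), by simp, le_refl _, le_refl _⟩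
        · obtain ⟨c, hc, hc1, hc2⟩ := G4 iv hiv'
          exact ⟨c, by simp [hc], hc1, hc2⟩
      · intro c hc
        rcases List.mem_cons.mp hc with rfl | hc'
        · exact ⟨(cl, e), by simp, rfl⟩
        · obtain ⟨iv, hiv, h1⟩ := G5 c hc'
          exact ⟨iv, by simp [List.mem_cons.mp hiv], h1⟩
      · intro c hc
        rcases List.mem_cons.mp hc with rfl | hc'
        · exact ⟨(cl, e), by simp, rfl⟩
        · obtain ⟨iv, hiv, h2⟩ := G6 c hc'
          exact ⟨iv, by simp [List.mem_cons.mp hiv], h2⟩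
      · intro c hc
        rcases List.mem_cons.mp hc with rfl | hc'
        · exact le_refl _
        · exact le_trans hcl_lo (G7 c hc')

-- the B-side start list of a row
def pvStarts (ivs : List (Int × Int)) : List Int :=
  PySem.Set.ofList ((ivs.filter (fun iv => !pvCov ivs (iv.1 - 1))).map (fun iv => iv.1))

-- coverage is permutation-invariant
lemma pvCov_perm {L L' : List (Int × Int)} (h : L.Perm L') (x : Int) :
    pvCov L x = pvCov L' x := h.any_eq

lemma pvCov_iff (L : List (Int × Int)) (x : Int) :
    pvCov L x = true ↔ ∃ iv ∈ L, iv.1 ≤ x ∧ x ≤ iv.2 := by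
  simp [pvCov]

lemma mem_pvStarts (ivs : List (Int × Int)) (x : Int) :
    x ∈ pvStarts ivs ↔ ∃ iv ∈ ivs, iv.1 = x ∧ pvCov ivs (iv.1 - 1) = false := by
  unfold pvStarts
  rw [PySem.Set.mem_ofList]
  simp only [List.mem_map, List.mem_filter, Bool.not_eq_eq_eq_not, Bool.not_true]
  constructor
  · rintro ⟨iv, ⟨h1, h2⟩, rfl⟩; exact ⟨iv, h1, rfl, h2⟩
  · rintro ⟨iv, h1, rfl, h2⟩; exact ⟨iv, ⟨h1, h2⟩, rfl⟩

-- central lemma: on a valid interval list, A's merged components line up with B's start count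
lemma pvRowCore (L : List (Int × Int)) (hv : ∀ iv ∈ L, iv.1 ≤ iv.2) :
    ((pvStarts L).length = (pvMergeRanges L).length) ∧
    ((pvMergeRanges L).length = 2 →
      ∃ c1 c2, pvMergeRanges L = [c1, c2] ∧
        PySem.List.max? (pvStarts L) (fun x => x) = some c2.1 ∧
        PySem.List.max? ((L.filter (fun iv => iv.2 < c2.1)).map (fun iv => iv.2)) (fun x => x)
          = some c1.2) := by
  rcases hss : PySem.List.sorted L (fun r => r.1) false with _ | ⟨c, t⟩
  · have hL : L = [] := (PySem.List.sorted_eq_nil_iff _ _ _).mp hss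
    subst hL
    refine ⟨?_, ?_⟩
    · rw [pvMergeRanges_nil]; rfl
    · intro h2; rw [pvMergeRanges_nil] at h2; simp at h2
  · have hperm : (c :: t).Perm L := by
      rw [← hss]; exact PySem.List.sorted_perm _ _ _
    have hpwss : (c :: t).Pairwise (fun a b => (a : Int × Int).1 ≤ b.1) := by
      rw [← hss]; exact PySem.List.sorted_pairwise _ _
    have hvss : ∀ iv ∈ c :: t, iv.1 ≤ iv.2 := fun iv h => hv iv (hperm.subset h)
    have hme : pvMergeRanges L = pvMergeRec c t := pvMergeRanges_eq L c t hss
    obtain ⟨G1, G2, G3, G4, G5, G6, G7⟩ :=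
      pvGood t c.1 c.2 (hvss c List.mem_cons_self)
        (fun iv hiv => (List.pairwise_cons.mp hpwss).1 iv hiv)
        (List.pairwise_cons.mp hpwss).2
        (fun iv hiv => hvss iv (List.mem_cons_of_mem _ hiv))
    simp only [Prod.mk.eta] at G1 G2 G3 G4 G5 G6 G7
    have hcov : ∀ x, pvCov (c :: t) x = pvCov L x := fun x => pvCov_perm hperm x
    -- membership equivalence between B's starts and the merged components' starts
    have hmemequiv : ∀ x, x ∈ pvStarts L ↔ x ∈ (pvMergeRec c t).map (fun p => p.1) := by
      intro x
      rw [mem_pvStarts]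
      constructor
      · rintro ⟨iv, hivL, rfl, hcf⟩
        obtain ⟨cc, hcc, h1, h2⟩ := G4 iv (hperm.mem_iff.mpr hivL)
        rcases lt_or_eq_of_le h1 with hlt | heq
        · exfalso
          have hiv2 : iv.1 ≤ iv.2 := hv iv hivL
          have := G3 cc hcc (iv.1 - 1) (by omega) (by omega)
          rw [hcov] at this; rw [this] at hcf; exact Bool.noConfusion hcf
        · exact List.mem_map.mpr ⟨cc, hcc, heq.symm ▸ rfl⟩
      · rintro hx
        obtain ⟨cc, hcc, rfl⟩ := List.mem_map.mp hx
        obtain ⟨iv, hivss, hiv1⟩ := G5 cc hcc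
        refine ⟨iv, hperm.subset hivss, hiv1, ?_⟩
        by_contra hcb
        have hct : pvCov L (iv.1 - 1) = true := by
          cases hcl : pvCov L (iv.1 - 1) with
          | false => exact absurd hcl hcb
          | true => rfl
        obtain ⟨jv, hjvL, hj1, hj2⟩ := (pvCov_iff L (iv.1 - 1)).mp hct
        obtain ⟨cc', hcc', h1', h2'⟩ := G4 jv (hperm.mem_iff.mpr hjvL)
        have hne : cc' ≠ cc := by
          intro hccc; subst hccc
          omega
        have hsymm : Symmetric (fun a b : Int × Int => a.2 + 2 ≤ b.1 ∨ b.2 + 2 ≤ a.1) := by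
          intro a b h; tauto
        have hforall := List.Pairwise.forall hsymm (G1.imp (fun h => Or.inl h))
        have hG2 := G2 cc hcc
        have hG2' := G2 cc' hcc'
        rcases hforall hcc' hcc hne with hAB | hBA <;> omega
    have hnodupmap : ((pvMergeRec c t).map (fun p => p.1)).Nodup := by
      have hplt : (pvMergeRec c t).Pairwise (fun a b => a.1 < b.1) := by
        refine List.Pairwise.imp_of_mem ?_ G1
        intro a b ha hb h
        have := G2 a ha; omega
      exact List.pairwise_map.mpr (hplt.imp fun h => ne_of_lt h)
    have hnodupS : (pvStarts L).Nodup := by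
      unfold pvStarts; exact PySem.Set.nodup_ofList _
    have hpermS : (pvStarts L).Perm ((pvMergeRec c t).map (fun p => p.1)) :=
      (List.perm_ext_iff_of_nodup hnodupS hnodupmap).mpr hmemequiv
    refine ⟨?_, ?_⟩
    · rw [hme, hpermS.length_eq, List.length_map]
    · intro h2
      rw [hme] at h2 ⊢
      obtain ⟨c1, c2, hab⟩ := List.length_eq_two.mp h2
      have hc1m : c1 ∈ pvMergeRec c t := by rw [hab]; simp
      have hc2m : c2 ∈ pvMergeRec c t := by rw [hab]; simp
      have hsep : c1.2 + 2 ≤ c2.1 := by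
        have hG := G1; rw [hab] at hG
        exact (List.pairwise_cons.mp hG).1 c2 (by simp)
      have h11 := G2 c1 hc1m
      have h22 := G2 c2 hc2m
      refine ⟨c1, c2, hab, ?_, ?_⟩
      · -- max of starts is the second component's start
        have hSmem : ∀ x, x ∈ pvStarts L ↔ (x = c1.1 ∨ x = c2.1) := by
          intro x; rw [hmemequiv, hab]; simp
        have hc2S : c2.1 ∈ pvStarts L := (hSmem _).mpr (Or.inr rfl)
        cases hmax : PySem.List.max? (pvStarts L) (fun x => x) with
        | none =>
          exfalso
          have hnil := (PySem.List.max?_eq_none_iff _ _).mp hmax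
          rw [hnil] at hc2S
          exact absurd hc2S List.not_mem_nil
        | some m =>
          have hmS : m ∈ pvStarts L := PySem.List.max?_mem hmax
          have hle : c2.1 ≤ m := PySem.List.max?_isMax hmax c2.1 hc2S
          rcases (hSmem m).mp hmS with rfl | rfl
          · exact absurd hle (by omega)
          · rfl
      · -- max of ends below c2.1 is the first component's end
        have hc1e : c1.2 ∈ (L.filter (fun iv => iv.2 < c2.1)).map (fun iv => iv.2) := by
          obtain ⟨iv, hivss, hiv2⟩ := G6 c1 hc1m
          refine List.mem_map.mpr ⟨iv, List.mem_filter.mpr ⟨hperm.subset hivss, ?_⟩, hiv2⟩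
          simp only [decide_eq_true_eq]
          omega
        have hub : ∀ v ∈ (L.filter (fun iv => iv.2 < c2.1)).map (fun iv => iv.2), v ≤ c1.2 := by
          intro v hv'
          obtain ⟨jv, hjf, rfl⟩ := List.mem_map.mp hv'
          obtain ⟨hjL, hjc⟩ := List.mem_filter.mp hjf
          simp only [decide_eq_true_eq] at hjc
          obtain ⟨cc, hcc, h1', h2'⟩ := G4 jv (hperm.mem_iff.mpr hjL)
          rw [hab] at hcc
          rcases List.mem_cons.mp hcc with rfl | hcc'
          · exact h2'
          · rcases List.mem_cons.mp hcc' with rfl | hemp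
            · exfalso; have := hv jv hjL; omega
            · exact absurd hemp List.not_mem_nil
        cases hmax2 : PySem.List.max? ((L.filter (fun iv => iv.2 < c2.1)).map (fun iv => iv.2)) (fun x => x) with
        | none =>
          exfalso
          have hnil := (PySem.List.max?_eq_none_iff _ _).mp hmax2
          rw [hnil] at hc1e
          exact absurd hc1e List.not_mem_nil
        | some m =>
          have hmm := PySem.List.max?_mem hmax2
          have hge : c1.2 ≤ m := PySem.List.max?_isMax hmax2 c1.2 hc1e
          have hle2 : m ≤ c1.2 := hub m hmm
          rw [le_antisymm hle2 hge]

lemma pvFilterMap_ite {α β : Type} (l : List α) (p : α → Prop) [DecidablePred p] (f : α → β) :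
    l.filterMap (fun x => if p x then some (f x) else none)
      = (l.filter (fun x => decide (p x))).map f := by
  induction l with
  | nil => rfl
  | cons x l ih =>
    by_cases h : p x <;> simp [h, ih]

-- the interval lists built per row by the two programs coincide
lemma pvIntervals_eq (items : List ((Int × Int) × Int)) (y : Int) :
    items.foldl (fun acc p =>
      let m := p.2
      if (p.1.2 > y ∧ y ≥ p.1.2 - m) ∨ (p.1.2 ≤ y ∧ y ≤ p.1.2 + m) then
        let dy := |p.1.2 - y|
        acc ++ [(p.1.1 - |m - dy|, p.1.1 + |m - dy|)]
      else acc) []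
    = items.filterMap (fun p =>
        let r := p.2 - |p.1.2 - y|
        if r ≥ 0 then some (p.1.1 - r, p.1.1 + r) else none) := by
  have h1 : items.foldl (fun acc p =>
      let m := p.2
      if (p.1.2 > y ∧ y ≥ p.1.2 - m) ∨ (p.1.2 ≤ y ∧ y ≤ p.1.2 + m) then
        let dy := |p.1.2 - y|
        acc ++ [(p.1.1 - |m - dy|, p.1.1 + |m - dy|)]
      else acc) []
      = items.foldl (fun acc p =>
        if p.2 - |p.1.2 - y| ≥ 0 then
          acc ++ [(p.1.1 - (p.2 - |p.1.2 - y|), p.1.1 + (p.2 - |p.1.2 - y|))]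
        else acc) [] := by
    apply PySem.List.foldl_congr_mem
    intro acc p _
    dsimp only
    rcases abs_cases (p.1.2 - y) with ⟨h1, h2⟩ | ⟨h1, h2⟩ <;> rw [h1]
    · by_cases hc : p.2 - (p.1.2 - y) ≥ 0
      · rw [if_pos hc, if_pos (by omega), abs_of_nonneg (by omega : (0:Int) ≤ p.2 - (p.1.2 - y))]
      · rw [if_neg hc, if_neg (by omega)]
    · by_cases hc : p.2 - -(p.1.2 - y) ≥ 0
      · rw [if_pos hc, if_pos (by omega), abs_of_nonneg (by omega : (0:Int) ≤ p.2 - -(p.1.2 - y))]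
      · rw [if_neg hc, if_neg (by omega)]
  rw [h1]
  rw [PySem.List.foldl_append_ite (p := fun p : (Int × Int) × Int => p.2 - |p.1.2 - y| ≥ 0)
    (f := fun p : (Int × Int) × Int => (p.1.1 - (p.2 - |p.1.2 - y|), p.1.1 + (p.2 - |p.1.2 - y|)))]
  rw [pvFilterMap_ite]
  rfl

-- the two row computations agree
lemma pvRow_eq (d : PySem.Dict (Int × Int) Int) (hnd : d.keys.Nodup) (y : Int) :
    pvRowA d y = pvRowB d.items y := by
  simp only [pvRowA, pvRowB]
  have hkeys : d.keys = d.items.map (fun p => p.1) := rfl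
  have hL : d.keys.foldl (fun acc s =>
      let m := (d.get? s).getD 0
      if (s.2 > y ∧ y ≥ s.2 - m) ∨ (s.2 ≤ y ∧ y ≤ s.2 + m) then
        let dy := |s.2 - y|
        acc ++ [(s.1 - |m - dy|, s.1 + |m - dy|)]
      else acc) []
      = d.items.filterMap (fun p =>
        let r := p.2 - |p.1.2 - y|
        if r ≥ 0 then some (p.1.1 - r, p.1.1 + r) else none) := by
    rw [← pvIntervals_eq, hkeys, List.foldl_map]
    apply PySem.List.foldl_congr_mem
    intro acc p hp
    have hm : (d.get? p.1).getD 0 = p.2 := by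
      rw [PySem.Dict.get?_of_mem_items d (show (p.1, p.2) ∈ d.items by simpa using hp) hnd]
      rfl
    dsimp only
    rw [hm]
  rw [hL]
  set ivs := d.items.filterMap (fun p =>
    let r := p.2 - |p.1.2 - y|
    if r ≥ 0 then some (p.1.1 - r, p.1.1 + r) else none) with hivs
  have hv : ∀ iv ∈ ivs, iv.1 ≤ iv.2 := by
    intro iv hiv
    rw [hivs] at hiv
    obtain ⟨p, _, hsome⟩ := List.mem_filterMap.mp hiv
    dsimp only at hsome
    by_cases hr : p.2 - |p.1.2 - y| ≥ 0
    · rw [if_pos hr] at hsome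
      cases hsome
      dsimp only
      omega
    · rw [if_neg hr] at hsome
      exact absurd hsome (by simp)
  have hS : PySem.Set.ofList ((ivs.filter (fun iv => !pvCov ivs (iv.1 - 1))).map (fun iv => iv.1))
      = pvStarts ivs := rfl
  rw [hS]
  obtain ⟨hlen, hrest⟩ := pvRowCore ivs hv
  by_cases h2 : (pvMergeRanges ivs).length = 2
  · obtain ⟨c1, c2, hab, hmaxS, hmaxE⟩ := hrest h2
    rw [hab]
    have hcondA : (PySem.List.len [c1, c2] == (2:Int)) = true := by
      simp [PySem.List.len_eq]
    have hcondB : (PySem.Set.len (pvStarts ivs) == (2:Int)) = true := by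
      have hl2 : (pvStarts ivs).length = 2 := by rw [hlen, h2]
      simp [PySem.Set.len, hl2]
    rw [if_pos hcondA, if_pos hcondB, hmaxS]
    dsimp only
    rw [hmaxE]
    dsimp only
    rw [PySem.List.pyGetD_zero_cons]
  · have hcondA : ¬ ((PySem.List.len (pvMergeRanges ivs) == (2:Int)) = true) := by
      simp [PySem.List.len_eq]
      omega
    have hcondB : ¬ ((PySem.Set.len (pvStarts ivs) == (2:Int)) = true) := by
      simp [PySem.Set.len]
      omega
    rw [if_neg hcondA, if_neg hcondB]

lemma pvRows_eq (d : PySem.Dict (Int × Int) Int) (hnd : d.keys.Nodup) (ys : List Int) :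
    pvRowsA d ys = pvRowsB d.items ys := by
  induction ys with
  | nil => rfl
  | cons y ys ih =>
    simp only [pvRowsA, pvRowsB, pvRow_eq d hnd y]
    cases pvRowB d.items y <;> simp [ih]

-- ===== VERDICT (by name: the statement is the Claim_ definition above) =====
theorem tuning_frequency_spec : Claim_equal_tuning_frequency := by
  intro data bounds _
  unfold Spec_tuning_frequency tuning_frequency tuning_frequency_alt
  have hd : (data.foldl (fun d p => d.insert p.1 (pvManhattan p.1 p.2))
      (PySem.Dict.empty : PySem.Dict (Int × Int) Int)) =
      data.foldl (fun d p => d.insert p.1 (|p.1.1 - p.2.1| + |p.1.2 - p.2.2|)) PySem.Dict.empty := rfl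
  rw [← hd]
  exact pvRows_eq _ (PySem.Dict.nodup_keys_foldl_insert_key data (fun p => p.1) _ _
    (by simp [PySem.Dict.empty, PySem.Dict.keys])) _
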